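-- pv_equiv track=rewrite | github.com/IodumLD50/Bagels | Бейглз.py | qetClues
-- ===== SOURCE A (Python) =====
-- def qetClues(quess, secretNum):
--     '''Возвращаем строку с подсказками pico, fermi и baqels
--     для полученной на входе пары из догадки и секретного числа.'''
--     if quess == secretNum:
--         return 'You qot it'
--
--     clues = []
--
--     for i in range(len(quess)):
--         if quess[i] == secretNum[i]:
--             # Правильная цифра на правильном месте.
--             clues.append('Fermi')
--         elif quess[i] in secretNum:
--             # Правильная цифра на неправильном месте.
--             clues.append('Pico')
--     if len(clues) == 0:
--         return 'Baqels' # Правильных цифр нет вообще.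
--     else:
--         # Сортируем подсказки в алфовитном порядке, чтобы их исходный порядок
--         # ничего не выдавал.
--         clues.sort()
--         # Склеиваем список подсказок в одно строковое значение.
--         return ' '.join(clues)
-- ===== SOURCE B (Python) =====
-- def qetClues(quess, secretNum):
--     if quess == secretNum:
--         return 'You qot it'
--     pairs = list(zip(quess, secretNum))
--     fermi = sum(q == s for q, s in pairs)
--     hits = sum(q in secretNum for q, _ in pairs)
--     if hits == 0:
--         return 'Baqels'
--     return ' '.join(['Fermi'] * fermi + ['Pico'] * (hits - fermi))
-- ===== Notes on version B (the rewrite author's own statement) =====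
-- stated objective: simpler
-- what changed: B has no branching loop and no sort: it makes two staged counting passes (fermi = matching positions, hits = positions whose guess digit occurs in the secret) and derives pico arithmetically as hits - fermi, since every Fermi position is automatically a hit; the hint string is assembled directly as ' '.join(['Fermi']*fermi + ['Pico']*pico).
import Mathlib
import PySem

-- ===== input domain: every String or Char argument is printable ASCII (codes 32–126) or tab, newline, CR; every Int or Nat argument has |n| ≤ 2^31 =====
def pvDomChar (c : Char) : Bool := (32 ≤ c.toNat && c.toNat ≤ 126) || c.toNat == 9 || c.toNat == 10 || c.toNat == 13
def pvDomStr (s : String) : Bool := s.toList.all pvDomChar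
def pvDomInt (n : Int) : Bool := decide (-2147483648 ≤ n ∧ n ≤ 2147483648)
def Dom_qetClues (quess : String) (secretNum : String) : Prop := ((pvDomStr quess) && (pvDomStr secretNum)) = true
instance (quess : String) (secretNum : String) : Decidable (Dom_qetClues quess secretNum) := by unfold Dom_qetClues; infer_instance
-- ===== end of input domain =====

-- B replaces A's branching clue-list loop + alphabetical sort by two staged
-- counting passes (fermi = exact matches, hits = guess digits occurring in the
-- secret) and the identity pico = hits - fermi, assembling the string directly
-- (objective: simpler — no clue list, no per-position branching, no sort).

-- ===== PORT A =====
def qetClues (quess : String) (secretNum : String) : String :=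
  if quess = secretNum then "You qot it"
  else
    let clues :=
      (PySem.List.pyRange 0 (PySem.List.len quess.toList)).foldl
        (fun acc i =>
          if PySem.List.pyGetD quess.toList i ' ' = PySem.List.pyGetD secretNum.toList i ' ' then
            acc ++ ["Fermi"]
          else if PySem.List.pyGetD quess.toList i ' ' ∈ secretNum.toList then
            acc ++ ["Pico"]
          else acc) ([] : List String)
    if PySem.List.len clues = 0 then "Baqels"
    else PySem.Str.join " " (PySem.List.sorted clues (fun x => x) false)

-- ===== PORT B =====
def qetClues_alt (quess : String) (secretNum : String) : String :=
  if quess = secretNum then "You qot it"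
  else
    let pairs := quess.toList.zip secretNum.toList
    -- sum of booleans over a list = countP (the library form of Source B's sum(...))
    let fermi : Int := (pairs.countP (fun p => decide (p.1 = p.2)) : Int)
    let hits : Int := (pairs.countP (fun p => decide (p.1 ∈ secretNum.toList)) : Int)
    if hits = 0 then "Baqels"
    else PySem.Str.join " "
      (PySem.List.pyRepeat ["Fermi"] fermi ++ PySem.List.pyRepeat ["Pico"] (hits - fermi))

-- ===== PRECONDITION & SPEC =====
-- Pre_ excludes exactly the inputs where the Python A raises IndexError:
-- a guess longer than the secret makes 'secretNum[i]' go out of range.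
def Pre_qetClues (quess : String) (secretNum : String) : Prop :=
  quess.toList.length ≤ secretNum.toList.length
instance (quess : String) (secretNum : String) : Decidable (Pre_qetClues quess secretNum) := by unfold Pre_qetClues; infer_instance
def pvWitness_qetClues : String × String := ("12", "13")

def Spec_qetClues (quess : String) (secretNum : String) (out : String) : Prop := out = qetClues_alt quess secretNum
instance (quess : String) (secretNum : String) (out : String) : Decidable (Spec_qetClues quess secretNum out) := by unfold Spec_qetClues; infer_instance

-- ===== CLAIM (what is proved, stated in full; the proofs are below) =====
def Claim_equal_qetClues : Prop := ∀ (quess : String) (secretNum : String), Dom_qetClues quess secretNum → Pre_qetClues quess secretNum → Spec_qetClues quess secretNum (qetClues quess secretNum)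

-- ===== LEMMAS AND PROOFS =====

-- the clue(s) A appends for one position, as a function of the (quess, secret) char pair
def pvClue (s : List Char) (p : Char × Char) : List String :=
  if p.1 = p.2 then ["Fermi"] else if p.1 ∈ s then ["Pico"] else []

def pvIsFermi : Char × Char → Bool := fun p => decide (p.1 = p.2)
def pvIsPico (s : List Char) : Char × Char → Bool :=
  fun p => !decide (p.1 = p.2) && decide (p.1 ∈ s)

lemma pv_loopA (q s : List Char) (h : q.length ≤ s.length) :
    (PySem.List.pyRange 0 (PySem.List.len q)).foldl
      (fun acc i =>
        if PySem.List.pyGetD q i ' ' = PySem.List.pyGetD s i ' ' then acc ++ ["Fermi"]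
        else if PySem.List.pyGetD q i ' ' ∈ s then acc ++ ["Pico"]
        else acc) ([] : List String)
    = (q.zip s).flatMap (pvClue s) := by
  have hlen : (q.zip s).length = q.length := by
    simp [List.length_zip]; omega
  have hlen' : PySem.List.len q = PySem.List.len (q.zip s) := by
    simp [PySem.List.len, hlen]
  rw [hlen']
  rw [PySem.List.foldl_congr_mem _ _
      (fun acc i => acc ++ pvClue s (PySem.List.pyGetD (q.zip s) i (' ', ' '))) _ ?_]
  · rw [PySem.List.foldl_pyRange_pyGetD (q.zip s) (' ', ' ')
        (fun acc p => acc ++ pvClue s p) _ (le_refl 0)]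
    simp only [Int.toNat_zero, List.drop_zero, PySem.List.foldl_append_eq_flatMap,
      List.nil_append]
  · intro acc i hi
    rw [PySem.List.mem_pyRange_one] at hi
    have hiq : i < (q.length : Int) := by
      have := hi.2; simpa [PySem.List.len, hlen] using this
    have his : i < (s.length : Int) := by omega
    have hiz : i < ((q.zip s).length : Int) := by omega
    simp only [PySem.List.pyGetD_eq_getElem q ' ' hi.1 hiq,
      PySem.List.pyGetD_eq_getElem s ' ' hi.1 his,
      PySem.List.pyGetD_eq_getElem (q.zip s) (' ', ' ') hi.1 hiz,
      List.getElem_zip, pvClue]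
    split_ifs <;> simp

-- every Fermi position is a hit: over pairs whose second component lies in s,
-- counting 'q ∈ s' counts exactly the Fermi positions plus the Pico positions.
lemma pv_hits_split (s : List Char) (l : List (Char × Char))
    (hl : ∀ p ∈ l, p.2 ∈ s) :
    l.countP (fun p => decide (p.1 ∈ s))
    = l.countP pvIsFermi + l.countP (pvIsPico s) := by
  induction l with
  | nil => simp
  | cons p t ih =>
    have hp2 : p.2 ∈ s := hl p (List.mem_cons_self ..)
    have iht := ih (fun x hx => hl x (List.mem_cons_of_mem _ hx))
    by_cases h1 : p.1 = p.2
    · have hm : p.1 ∈ s := h1 ▸ hp2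
      simp [List.countP_cons, pvIsFermi, pvIsPico, h1, hm, hp2, iht]
      omega
    · by_cases h2 : p.1 ∈ s
      · simp only [List.countP_cons, pvIsFermi, pvIsPico, iht]
        simp [h1, h2]; omega
      · simp only [List.countP_cons, pvIsFermi, pvIsPico, iht]
        simp [h1, h2]

lemma pv_flat_perm (s : List Char) (l : List (Char × Char)) :
    (l.flatMap (pvClue s)).Perm
      (List.replicate (l.countP pvIsFermi) "Fermi" ++ List.replicate (l.countP (pvIsPico s)) "Pico") := by
  induction l with
  | nil => simp
  | cons p t ih =>
    by_cases h1 : p.1 = p.2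
    · simp only [List.flatMap_cons, pvClue, List.countP_cons, pvIsFermi, pvIsPico, h1]
      simpa [List.replicate_succ] using ih.cons "Fermi"
    · by_cases h2 : p.1 ∈ s
      · simp only [List.flatMap_cons, pvClue, List.countP_cons,
          pvIsFermi, pvIsPico, h1, h2]
        simp only [decide_eq_true_eq]
        refine (ih.cons "Pico").trans ?_
        simpa [List.replicate_succ] using
          (List.perm_middle (a := "Pico")
            (l₁ := List.replicate (t.countP pvIsFermi) "Fermi")
            (l₂ := List.replicate (t.countP (pvIsPico s)) "Pico")).symm
      · simp only [List.flatMap_cons, pvClue, List.countP_cons,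
          pvIsFermi, pvIsPico, h1, h2]
        simpa using ih

lemma pv_fermi_le_pico : ("Fermi" : String) ≤ "Pico" :=
  le_of_lt (by rw [String.lt_iff_toList_lt]; decide)

lemma pv_sorted_eq (s : List Char) (l : List (Char × Char)) :
    PySem.List.sorted (l.flatMap (pvClue s)) (fun x => x) false
    = List.replicate (l.countP pvIsFermi) "Fermi" ++ List.replicate (l.countP (pvIsPico s)) "Pico" := by
  apply PySem.List.sorted_id_eq_of_perm_of_pairwise
  · exact (pv_flat_perm s l).symm
  · rw [List.pairwise_append]
    refine ⟨List.pairwise_replicate.2 (Or.inr le_rfl), List.pairwise_replicate.2 (Or.inr le_rfl), ?_⟩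
    intro x hx y hy
    rw [List.eq_of_mem_replicate hx, List.eq_of_mem_replicate hy]
    exact pv_fermi_le_pico

-- ===== VERDICT (by name: the statement is the Claim_ definition above) =====
theorem qetClues_spec : Claim_equal_qetClues := by
  intro quess secretNum _ hpre
  unfold Spec_qetClues qetClues qetClues_alt
  by_cases heq : quess = secretNum
  · simp [heq]
  · simp only [if_neg heq]
    set l := quess.toList.zip secretNum.toList with hl
    have hmem : ∀ p ∈ l, p.2 ∈ secretNum.toList := by
      intro p hp
      exact List.of_mem_zip hp |>.2
    rw [pv_loopA quess.toList secretNum.toList hpre, pv_sorted_eq]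
    have hfermi : (l.countP (fun p => decide (p.1 = p.2))) = l.countP pvIsFermi := rfl
    rw [hfermi, pv_hits_split secretNum.toList l hmem]
    have hlenc : PySem.List.len (List.flatMap (pvClue secretNum.toList) l)
        = ((l.countP pvIsFermi : Int) + (l.countP (pvIsPico secretNum.toList) : Int)) := by
      have := (pv_flat_perm secretNum.toList l).length_eq
      simp only [List.length_append, List.length_replicate] at this
      simp only [PySem.List.len, this]
      push_cast; ring
    rw [hlenc]
    by_cases hz : ((l.countP pvIsFermi : Int) + (l.countP (pvIsPico secretNum.toList) : Int)) = 0
    · rw [if_pos hz]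
      have : ((↑(l.countP pvIsFermi + l.countP (pvIsPico secretNum.toList)) : Int)) = 0 := by
        push_cast; omega
      rw [if_pos this]
    · rw [if_neg hz]
      have hz' : ((↑(l.countP pvIsFermi + l.countP (pvIsPico secretNum.toList)) : Int)) ≠ 0 := by
        push_cast; push_cast at hz; omega
      have hsub : ((↑(l.countP pvIsFermi + l.countP (pvIsPico secretNum.toList)) : Int))
          - (↑(l.countP pvIsFermi) : Int) = (↑(l.countP (pvIsPico secretNum.toList)) : Int) := by
        push_cast; ring
      rw [if_neg hz', hsub, PySem.List.pyRepeat_singleton, PySem.List.pyRepeat_singleton]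
      simp [hl]
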